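/- GENERATED by farm/mkstatement.py from design/units.tsv (unit `start_decoder.C9c`) and the assertions of Vorbis/Spec/StartDecoderC9.lean — do not edit.
   THE STATEMENT of the proof unit `start_decoder.C9c`: segment C9c of `start_decoder` (27 instructions; entries 0x11473b;
   exits 0x114788,0x114bad,0x114b91,0x114ba8; ranges 0x11473b-0x114782 + 0x114b7f-0x114b8c + 0x114b96-0x114ba3)
   takes each of its entry assertions to one of its exit assertions (`Vorbis.Spec.StartDecoder.SegC9c`), given the contracts of its callees.
   What the names mean: Vorbis/Spec/Basic.lean (the shared hypotheses), Vorbis/Spec/StartDecoderC9.lean (the assertions). The theorem to prove: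
   `theorem start_decoder_C9c_ok : Vorbis.Spec.start_decoder_C9c.Statement`. -/
import Vorbis.Spec.Leaves
import Vorbis.Spec.StartDecoderC9
namespace Vorbis.Spec.start_decoder_C9c
open X86 X86.User Asan

/-- The statement of unit `start_decoder.C9c`. -/
def Statement : Prop :=
  ∀ (Lay : Layout) (_hLay : Lay.hi = 0x1000000) (μ : Microarch) (_hμ : UserX.MicroOK μ) (u₀ : State)
    (_hcode : HasCodeNat Lay u₀ Vorbis.L.start_decoder.entry Vorbis.Code.code_start_decoder.nat Vorbis.L.start_decoder.size)
    (_h_asan_store1_noabort : Asan.SmallCheck Lay μ Vorbis.WayInv (Vorbis.CodeOK u₀) [.rax, .rdx] 1 Vorbis.L.__asan_store1_noabort.entry)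
    (_h_asan_load4_noabort : Asan.SmallCheck Lay μ Vorbis.WayInv (Vorbis.CodeOK u₀) [.rax, .rcx, .rdx] 4 Vorbis.L.__asan_load4_noabort.entry)
    (_h_error : ∀ (others : List Obj) (frames : List (Nat × FrameLayout)), Calls Lay μ Vorbis.WayInv (Vorbis.conv u₀) Vorbis.L.error.entry (Vorbis.Spec.error.spec others frames)),
    Vorbis.Spec.StartDecoder.SegC9c Lay μ u₀

end Vorbis.Spec.start_decoder_C9c
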